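-- pv_equiv track=rewrite | github.com/Paberu/learning | 28exec16/sale.py | MaximumDiscount
-- ===== SOURCE A (Python) =====
-- def MaximumDiscount(n, prices):
--     discount = 0
--     while len(prices) > 3:
--         for i in range(3):
--             price = max(prices)
--             prices.remove(price)
--             if i == 2:
--                 discount += price
--     return discount
-- ===== SOURCE B (Python) =====
-- def MaximumDiscount(n, prices):
--     # Sort once (descending); every processed triple contributes its third
--     # element, and a triple starting at sorted index i is processed iff the
--     # remaining length len(s) - (i - 2) exceeds 3, i.e. i < len(s) - 1.
--     s = sorted(prices, reverse=True)
--     total = 0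
--     for i in range(2, len(s) - 1, 3):
--         total += s[i]
--     return total
-- ===== Notes on version B (the rewrite author's own statement) =====
-- stated objective: faster
-- what changed: Instead of repeatedly scanning for and removing the maximum (three scans per triple), B sorts the list descending once and sums every third element (indices 2, 5, 8, ...) while more than three elements remain.
import Mathlib
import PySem

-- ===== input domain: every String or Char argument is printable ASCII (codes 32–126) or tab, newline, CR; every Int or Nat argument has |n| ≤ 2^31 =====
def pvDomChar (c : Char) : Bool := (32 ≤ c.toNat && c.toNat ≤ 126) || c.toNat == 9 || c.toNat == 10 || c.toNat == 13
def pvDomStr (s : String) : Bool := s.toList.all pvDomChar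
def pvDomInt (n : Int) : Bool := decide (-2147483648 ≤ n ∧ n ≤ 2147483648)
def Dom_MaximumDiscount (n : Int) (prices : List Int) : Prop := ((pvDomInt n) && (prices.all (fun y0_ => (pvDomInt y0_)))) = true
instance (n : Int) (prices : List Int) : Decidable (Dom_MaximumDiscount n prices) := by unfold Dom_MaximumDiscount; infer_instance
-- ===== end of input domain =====

-- B sorts once (descending) and sums every third element instead of A's repeated
-- max-scan-and-remove: measured asymptotically faster (O(n log n) vs O(n^2)).
-- NOTE: Python A mutates `prices` in place (empties it down to ≤ 3 elements);
-- B does not. The equivalence proved here is about the RETURN value only.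

-- ===== PORT A =====
-- price = max(prices); prices.remove(price)   (Python max = first maximal value;
-- remove = drop first occurrence).  When prices ≠ [] the getD fallbacks never fire.
def pvPopMax (ps : List Int) : Int × List Int :=
  let price := (PySem.List.max? ps (fun x => x)).getD 0
  (price, (PySem.List.remove? ps price).getD ps)

theorem pvPopMax_len (ps : List Int) (h : ps ≠ []) :
    (pvPopMax ps).2.length + 1 = ps.length := by
  unfold pvPopMax
  cases hm : PySem.List.max? ps (fun x => x) with
  | none => exact absurd ((PySem.List.max?_eq_none_iff ps (fun x => x)).mp hm) h
  | some m =>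
    have hmem : m ∈ ps := PySem.List.max?_mem hm
    simp [PySem.List.remove?_eq_some_erase ps m hmem, List.length_erase_add_one hmem]

-- the while loop; the inner `for i in range(3)` body is unrolled: for i = 0, 1
-- the removed price is discarded, for i = 2 it is added to the discount
def pvLoopA (ps : List Int) (d : Int) : Int :=
  if h : ps.length > 3 then
    let r1 := pvPopMax ps
    let r2 := pvPopMax r1.2
    let r3 := pvPopMax r2.2
    pvLoopA r3.2 (d + r3.1)
  else d
termination_by ps.length
decreasing_by
  have h1 : ps ≠ [] := by intro he; simp [he] at h
  have e1 := pvPopMax_len ps h1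
  have h2 : (pvPopMax ps).2 ≠ [] := by
    intro he; rw [he] at e1; simp at e1; omega
  have e2 := pvPopMax_len _ h2
  have h3 : (pvPopMax (pvPopMax ps).2).2 ≠ [] := by
    intro he; rw [he] at e2; simp at e2; omega
  have e3 := pvPopMax_len _ h3
  omega

def MaximumDiscount (n : Int) (prices : List Int) : Int :=
  pvLoopA prices 0

-- ===== PORT B =====
def MaximumDiscount_alt (n : Int) (prices : List Int) : Int :=
  let s := PySem.List.sorted prices (fun x => x) true
  (PySem.List.pyRange 2 ((s.length : Int) - 1) 3).foldl
    (fun total i => total + PySem.List.pyGetD s i 0) 0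

-- ===== PRECONDITION & SPEC =====
def Spec_MaximumDiscount (n : Int) (prices : List Int) (out : Int) : Prop := out = MaximumDiscount_alt n prices
instance (n : Int) (prices : List Int) (out : Int) : Decidable (Spec_MaximumDiscount n prices out) := by unfold Spec_MaximumDiscount; infer_instance

-- ===== CLAIM (what is proved, stated in full; the proofs are below) =====
def Claim_equal_MaximumDiscount : Prop := ∀ (n : Int) (prices : List Int), Dom_MaximumDiscount n prices → Spec_MaximumDiscount n prices (MaximumDiscount n prices)

-- ===== LEMMAS AND PROOFS =====

theorem pvLoopA_eq (ps : List Int) (d : Int) :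
    pvLoopA ps d =
      if ps.length > 3 then
        pvLoopA (pvPopMax (pvPopMax (pvPopMax ps).2).2).2
          (d + (pvPopMax (pvPopMax (pvPopMax ps).2).2).1)
      else d := by
  conv_lhs => rw [pvLoopA]
  split_ifs <;> rfl

-- the value B sums for a given sorted list, as a map-sum
def pvBSum (s : List Int) : Int :=
  ((PySem.List.pyRange 2 ((s.length : Int) - 1) 3).map
    (fun i => PySem.List.pyGetD s i 0)).sum

theorem pvFoldl_add_map (l : List Int) (f : Int → Int) (a : Int) :
    l.foldl (fun t i => t + f i) a = a + (l.map f).sum := by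
  induction l generalizing a with
  | nil => simp
  | cons x t ih => simp [List.foldl_cons, ih, add_assoc]

theorem pvAlt_eq_bsum (n : Int) (prices : List Int) :
    MaximumDiscount_alt n prices
      = pvBSum (PySem.List.sorted prices (fun x => x) true) := by
  simp [MaximumDiscount_alt, pvBSum, pvFoldl_add_map]

theorem pvPopMax_perm {ps qs : List Int} (hp : ps.Perm qs) (hne : ps ≠ []) :
    (pvPopMax ps).1 = (pvPopMax qs).1 ∧ (pvPopMax ps).2.Perm (pvPopMax qs).2 := by
  have hqne : qs ≠ [] := fun he => hne (List.Perm.eq_nil (he ▸ hp))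
  cases hm1 : PySem.List.max? ps (fun x => x) with
  | none => exact absurd ((PySem.List.max?_eq_none_iff ps (fun x => x)).mp hm1) hne
  | some m1 =>
    cases hm2 : PySem.List.max? qs (fun x => x) with
    | none => exact absurd ((PySem.List.max?_eq_none_iff qs (fun x => x)).mp hm2) hqne
    | some m2 =>
      have hmem1 : m1 ∈ ps := PySem.List.max?_mem hm1
      have hmem2 : m2 ∈ qs := PySem.List.max?_mem hm2
      have heq : m1 = m2 :=
        le_antisymm (PySem.List.max?_isMax hm2 m1 (hp.mem_iff.mp hmem1))
          (PySem.List.max?_isMax hm1 m2 (hp.mem_iff.mpr hmem2))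
      subst heq
      unfold pvPopMax
      rw [hm1, hm2]
      simp only [Option.getD_some]
      rw [PySem.List.remove?_eq_some_erase ps m1 hmem1,
          PySem.List.remove?_eq_some_erase qs m1 (hp.mem_iff.mp hmem1)]
      exact ⟨by trivial, hp.erase m1⟩

theorem pvLoopA_perm (ps qs : List Int) (hp : ps.Perm qs) (d : Int) :
    pvLoopA ps d = pvLoopA qs d := by
  by_cases h : ps.length > 3
  · have hq : qs.length > 3 := by rw [← hp.length_eq]; exact h
    have hne : ps ≠ [] := by intro he; simp [he] at h
    have e1 := pvPopMax_len ps hne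
    obtain ⟨v1, q1⟩ := pvPopMax_perm hp hne
    have hne1 : (pvPopMax ps).2 ≠ [] := by intro he; rw [he] at e1; simp at e1; omega
    have e2 := pvPopMax_len _ hne1
    obtain ⟨v2, q2⟩ := pvPopMax_perm q1 hne1
    have hne2 : (pvPopMax (pvPopMax ps).2).2 ≠ [] := by
      intro he; rw [he] at e2; simp at e2; omega
    have e3 := pvPopMax_len _ hne2
    obtain ⟨v3, q3⟩ := pvPopMax_perm q2 hne2
    rw [pvLoopA_eq ps, pvLoopA_eq qs, if_pos h, if_pos hq]
    rw [v3, pvLoopA_perm _ _ q3]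
  · have hq : ¬ qs.length > 3 := by rw [← hp.length_eq]; exact h
    rw [pvLoopA_eq ps, pvLoopA_eq qs, if_neg h, if_neg hq]
termination_by ps.length
decreasing_by omega

theorem pvFoldl_max_of_le (m : Int) (t : List Int) (h : ∀ y ∈ t, y ≤ m) :
    t.foldl max m = m := by
  induction t generalizing m with
  | nil => rfl
  | cons x t ih =>
    have hx : x ≤ m := h x (by simp)
    simp [List.foldl_cons, max_eq_left hx]
    exact ih m (fun y hy => h y (by simp [hy]))

theorem pvPopMax_sorted (m : Int) (t : List Int)
    (h : (m :: t).Pairwise (fun a b => b ≤ a)) :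
    pvPopMax (m :: t) = (m, t) := by
  have hle : ∀ y ∈ t, y ≤ m := fun y hy => (List.pairwise_cons.mp h).1 y hy
  unfold pvPopMax
  rw [PySem.List.max?_id_cons, pvFoldl_max_of_le m t hle]
  simp

theorem pvRange3_cons (a b : Int) (h : a < b) :
    PySem.List.pyRange a b 3 = a :: PySem.List.pyRange (a + 3) b 3 := by
  rw [PySem.List.pyRange_of_pos a b (by norm_num),
      PySem.List.pyRange_of_pos (a + 3) b (by norm_num), if_pos h]
  by_cases h2 : a + 3 < b
  · rw [if_pos h2]
    have hn : ((b - a + 3 - 1) / 3).toNat = ((b - (a + 3) + 3 - 1) / 3).toNat + 1 := by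
      omega
    rw [hn, List.range_succ_eq_map]
    simp only [List.map_cons, List.map_map]
    congr 1
    · norm_num
    refine List.map_congr_left (fun k _ => ?_)
    simp only [Function.comp_apply, Nat.succ_eq_add_one]
    push_cast
    ring
  · rw [if_neg h2]
    have hn : ((b - a + 3 - 1) / 3).toNat = 1 := by omega
    rw [hn]
    simp

theorem pvRange3_shift (a b : Int) :
    PySem.List.pyRange (a + 3) (b + 3) 3
      = (PySem.List.pyRange a b 3).map (fun i => i + 3) := by
  rw [PySem.List.pyRange_of_pos a b (by norm_num),
      PySem.List.pyRange_of_pos (a + 3) (b + 3) (by norm_num)]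
  by_cases h : a < b
  · rw [if_pos h, if_pos (by omega : a + 3 < b + 3)]
    have hn : b + 3 - (a + 3) + 3 - 1 = b - a + 3 - 1 := by ring
    rw [hn, List.map_map]
    refine List.map_congr_left (fun k _ => ?_)
    simp only [Function.comp_apply]
    ring
  · rw [if_neg h, if_neg (by omega : ¬ a + 3 < b + 3)]
    simp

theorem pvGetD_shift3 (xs : List Int) (i : Int) (hi : 0 ≤ i) (d : Int) :
    PySem.List.pyGetD xs (i + 3) d = PySem.List.pyGetD (xs.drop 3) i d := by
  rw [PySem.List.pyGetD_of_nonneg xs d (by omega : (0:Int) ≤ i + 3),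
      PySem.List.pyGetD_of_nonneg (xs.drop 3) d hi]
  have h3 : (i + 3).toNat = 3 + i.toNat := by omega
  rw [h3]
  simp [List.getD_eq_getElem?_getD, List.getElem?_drop]

theorem pvBSum_small (s : List Int) (h : s.length ≤ 3) : pvBSum s = 0 := by
  unfold pvBSum
  rw [PySem.List.pyRange_of_pos 2 _ (by norm_num), if_neg (by omega)]
  simp

theorem pvBSum_step (s : List Int) (h : s.length > 3) :
    pvBSum s = PySem.List.pyGetD s 2 0 + pvBSum (s.drop 3) := by
  unfold pvBSum
  have hL : ((s.drop 3).length : Int) = (s.length : Int) - 3 := by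
    simp [List.length_drop]; omega
  rw [pvRange3_cons 2 ((s.length : Int) - 1) (by omega)]
  have hsp : PySem.List.pyRange (2 + 3) ((s.length : Int) - 1) 3
      = (PySem.List.pyRange 2 ((s.length : Int) - 4) 3).map (fun i => i + 3) := by
    have : ((s.length : Int) - 1) = ((s.length : Int) - 4) + 3 := by ring
    rw [this, pvRange3_shift]
  rw [hsp, hL]
  have h4 : (s.length : Int) - 3 - 1 = (s.length : Int) - 4 := by ring
  rw [h4]
  simp only [List.map_cons, List.sum_cons, List.map_map]
  congr 1
  congr 1
  refine List.map_congr_left (fun i hi => ?_)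
  have hi2 : 2 ≤ i := by
    have := (PySem.List.mem_pyRange_iff_of_pos (by norm_num : (0:Int) < 3) i).mp hi
    exact this.1
  simp only [Function.comp_apply]
  exact pvGetD_shift3 s i (by omega) 0

theorem pvLoopA_sorted_aux (N : Nat) : ∀ (s : List Int), s.length ≤ N →
    s.Pairwise (fun a b => b ≤ a) → ∀ d : Int, pvLoopA s d = d + pvBSum s := by
  induction N with
  | zero =>
    intro s hlen _ d
    rw [pvLoopA_eq, if_neg (by omega), pvBSum_small s (by omega)]
    ring
  | succ N ih =>
    intro s hlen hs d
    by_cases h : s.length > 3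
    · obtain ⟨a, b, c, t, rfl⟩ : ∃ a b c t, s = a :: b :: c :: t := by
        rcases s with _ | ⟨a, _ | ⟨b, _ | ⟨c, t⟩⟩⟩
        · simp at h
        · simp at h
        · simp at h
        · exact ⟨a, b, c, t, rfl⟩
      rw [pvLoopA_eq, if_pos h]
      have hs1 : (b :: c :: t).Pairwise (fun a b => b ≤ a) := hs.of_cons
      have hs2 : (c :: t).Pairwise (fun a b => b ≤ a) := hs1.of_cons
      have hst : t.Pairwise (fun a b => b ≤ a) := hs2.of_cons
      rw [pvPopMax_sorted a (b :: c :: t) hs]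
      rw [pvPopMax_sorted b (c :: t) hs1]
      rw [pvPopMax_sorted c t hs2]
      have hlt : t.length ≤ N := by simp only [List.length_cons] at hlen; omega
      rw [ih t hlt hst (d + c), pvBSum_step (a :: b :: c :: t) h]
      have hg : PySem.List.pyGetD (a :: b :: c :: t) 2 0 = c := by
        rw [PySem.List.pyGetD_of_nonneg (a :: b :: c :: t) 0 (by norm_num : (0:Int) ≤ 2)]
        rfl
      rw [hg]
      simp only [List.drop_succ_cons, List.drop_zero]
      ring
    · rw [pvLoopA_eq, if_neg h, pvBSum_small s (by omega)]
      ring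

theorem pvLoopA_sorted (s : List Int) (hs : s.Pairwise (fun a b => b ≤ a)) (d : Int) :
    pvLoopA s d = d + pvBSum s :=
  pvLoopA_sorted_aux s.length s le_rfl hs d



-- ===== VERDICT (by name: the statement is the Claim_ definition above) =====
theorem MaximumDiscount_spec : Claim_equal_MaximumDiscount := by
  intro n prices _
  unfold Spec_MaximumDiscount
  rw [pvAlt_eq_bsum]
  have hperm := (PySem.List.sorted_perm prices (fun x => x) true).symm
  unfold MaximumDiscount
  rw [pvLoopA_perm prices _ hperm 0,
      pvLoopA_sorted _ (PySem.List.sorted_pairwise_rev prices (fun x => x)) 0]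
  simp
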